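-- pv_equiv track=rewrite | github.com/nekozila96/JADAR | JADAR-main/JADAR-main/src/utils/merge_file.py | remove_duplicate_flows
-- ===== SOURCE A (Python) =====
-- from typing import Dict, List, Any, Set
--
-- def remove_duplicate_flows(flows: List[Dict[str, Any]]) -> List[Dict[str, Any]]:
--     """
--     Loại bỏ các luồng dữ liệu trùng lặp dựa trên source, sink và sink_class.
--     Giữ lại luồng có độ nghiêm trọng cao nhất.
--     """
--     if not flows:
--         return []
--
--     # Dictionary để lưu trữ các flows theo khóa duy nhất
--     unique_flows = {}
--
--     # Ánh xạ độ nghiêm trọng sang số để so sánh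
--     severity_mapping = {"CRITICAL": 4, "HIGH": 3, "MEDIUM": 2, "LOW": 1, "INFO": 0}
--
--     for flow in flows:
--         # Tạo khóa duy nhất dựa trên source, sink và sink_class
--         source = flow.get('source', 'unknown')
--         sink = flow.get('sink', 'unknown')
--         sink_class = flow.get('sink_class', flow.get('class', 'unknown'))
--         flow_key = f"{source}_{sink}_{sink_class}"
--
--         # Lấy độ nghiêm trọng hiện tại
--         current_severity = severity_mapping.get(flow.get('severity', 'MEDIUM'), 2)
--
--         # Nếu chưa có flow với khóa này hoặc flow hiện tại có độ nghiêm trọng cao hơn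
--         if (flow_key not in unique_flows or
--             severity_mapping.get(unique_flows[flow_key].get('severity', 'MEDIUM'), 2) < current_severity):
--             # Cập nhật giá trị mới
--             unique_flows[flow_key] = flow
--
--     return list(unique_flows.values())
-- ===== SOURCE B (Python) =====
-- def remove_duplicate_flows(flows):
--     """No dict at all: walk the list once; at each first occurrence of a key,
--     scan the remaining suffix for a strictly-higher-severity flow with the
--     same key (first one on ties) and emit it."""
--
--     def _get(f, key, default):
--         return f[key] if key in f else default
--
--     def _rank(f):
--         s = _get(f, 'severity', 'MEDIUM')
--         if s == 'CRITICAL':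
--             return 4
--         elif s == 'HIGH':
--             return 3
--         elif s == 'MEDIUM':
--             return 2
--         elif s == 'LOW':
--             return 1
--         elif s == 'INFO':
--             return 0
--         else:
--             return 2
--
--     def _key(f):
--         sc = _get(f, 'sink_class', _get(f, 'class', 'unknown'))
--         return _get(f, 'source', 'unknown') + '_' + _get(f, 'sink', 'unknown') + '_' + sc
--
--     result = []
--     seen = []
--     for i, f in enumerate(flows):
--         k = _key(f)
--         if k in seen:
--             continue
--         seen.append(k)
--         best = f
--         for g in flows[i + 1:]:
--             if _key(g) == k and _rank(best) < _rank(g):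
--                 best = g
--         result.append(best)
--     return result
-- ===== Notes on version B (the rewrite author's own statement) =====
-- stated objective: alternative
-- what changed: A makes one pass maintaining a dict of the best-so-far flow per composite key; B uses no dict at all: it walks the list keeping only a seen-keys list and, at each first occurrence of a key, scans the remaining suffix for a strictly-higher-severity flow with the same key (first one on ties), with the severity rank computed by an if/elif chain instead of a mapping dict.
import Mathlib
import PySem

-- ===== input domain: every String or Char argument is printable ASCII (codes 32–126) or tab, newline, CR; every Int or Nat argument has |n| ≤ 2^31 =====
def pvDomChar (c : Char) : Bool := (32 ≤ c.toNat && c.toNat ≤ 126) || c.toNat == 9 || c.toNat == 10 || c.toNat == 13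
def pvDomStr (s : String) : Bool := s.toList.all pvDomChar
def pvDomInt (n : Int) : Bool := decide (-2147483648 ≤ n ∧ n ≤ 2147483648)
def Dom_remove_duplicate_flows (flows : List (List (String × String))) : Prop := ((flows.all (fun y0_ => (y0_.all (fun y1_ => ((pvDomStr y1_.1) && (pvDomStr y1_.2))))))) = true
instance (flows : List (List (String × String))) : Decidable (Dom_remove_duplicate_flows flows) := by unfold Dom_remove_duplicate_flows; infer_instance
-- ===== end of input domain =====

-- B replaces A's running best-per-key dict by a dict-free double scan: emit, at each
-- first occurrence of a key, the first highest-severity flow of its suffix (objective: alternative).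

-- ===== PORT A =====
def flowGet (f : List (String × String)) (k dflt : String) : String :=
  (PySem.Dict.mk f).getD k dflt   -- Python dict .get on the flow (assoc list, first match)

def sevMap : PySem.Dict String Int :=
  PySem.Dict.ofList [("CRITICAL", 4), ("HIGH", 3), ("MEDIUM", 2), ("LOW", 1), ("INFO", 0)]

def flowKey (f : List (String × String)) : String :=
  flowGet f "source" "unknown" ++ "_" ++ flowGet f "sink" "unknown" ++ "_" ++
    (PySem.Dict.mk f).getD "sink_class" (flowGet f "class" "unknown")

def flowRank (f : List (String × String)) : Int :=
  sevMap.getD (flowGet f "severity" "MEDIUM") 2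

def stepA (d : PySem.Dict String (List (String × String))) (flow : List (String × String)) :
    PySem.Dict String (List (String × String)) :=
  let k := flowKey flow
  let cur := flowRank flow
  match d.get? k with                       -- 'flow_key not in unique_flows or …'
  | none => d.insert k flow
  | some g => if flowRank g < cur then d.insert k flow else d

def remove_duplicate_flows (flows : List (List (String × String))) : List (List (String × String)) :=
  if flows = [] then []
  else (flows.foldl stepA PySem.Dict.empty).values

-- ===== PORT B =====
-- Source B's _get: 'f[key] if key in f else default' — first-match assoc lookup, written out
def getB (f : List (String × String)) (k dflt : String) : String :=
  match f with
  | [] => dflt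
  | (k', v) :: t => if k' = k then v else getB t k dflt

-- Source B's _rank: an if/elif chain, no mapping dict
def rankB (f : List (String × String)) : Int :=
  let s := getB f "severity" "MEDIUM"
  if s = "CRITICAL" then 4
  else if s = "HIGH" then 3
  else if s = "MEDIUM" then 2
  else if s = "LOW" then 1
  else if s = "INFO" then 0
  else 2

def keyB (f : List (String × String)) : String :=
  let sc := getB f "sink_class" (getB f "class" "unknown")
  getB f "source" "unknown" ++ "_" ++ getB f "sink" "unknown" ++ "_" ++ sc

-- the outer loop: 'rest' is the suffix from the current position; 'flows[i+1:]' is its tail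
def bLoop (seen : List String) : List (List (String × String)) → List (List (String × String))
  | [] => []
  | f :: rest =>
    let k := keyB f
    if seen.contains k then bLoop seen rest
    else
      (rest.foldl (fun best g => if keyB g = k ∧ rankB best < rankB g then g else best) f)
        :: bLoop (seen ++ [k]) rest

def remove_duplicate_flows_alt (flows : List (List (String × String))) : List (List (String × String)) :=
  bLoop [] flows

-- ===== PRECONDITION & SPEC =====
def Spec_remove_duplicate_flows (flows : List (List (String × String))) (out : List (List (String × String))) : Prop := out = remove_duplicate_flows_alt flows
instance (flows : List (List (String × String))) (out : List (List (String × String))) : Decidable (Spec_remove_duplicate_flows flows out) := by unfold Spec_remove_duplicate_flows; infer_instance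

-- ===== CLAIM (what is proved, stated in full; the proofs are below) =====
def Claim_equal_remove_duplicate_flows : Prop := ∀ (flows : List (List (String × String))), Dom_remove_duplicate_flows flows → Spec_remove_duplicate_flows flows (remove_duplicate_flows flows)

-- ===== LEMMAS AND PROOFS =====

-- B's helpers compute A's helpers
lemma getB_eq_flowGet (f : List (String × String)) (k d : String) : getB f k d = flowGet f k d := by
  induction f with
  | nil => rfl
  | cons h t ih =>
    obtain ⟨k', v⟩ := h
    by_cases hk : k' = k <;>
      simp [getB, flowGet, PySem.Dict.getD, PySem.Dict.get?, hk] at ih ⊢ <;>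
      simpa [flowGet, PySem.Dict.getD, PySem.Dict.get?, PySem.Dict.mk] using ih

lemma keyB_eq (f : List (String × String)) : keyB f = flowKey f := by
  simp [keyB, flowKey, getB_eq_flowGet, flowGet]

lemma rankB_eq (f : List (String × String)) : rankB f = flowRank f := by
  simp only [rankB, flowRank, getB_eq_flowGet]
  generalize flowGet f "severity" "MEDIUM" = s
  by_cases h1 : s = "CRITICAL"
  · subst h1; rfl
  by_cases h2 : s = "HIGH"
  · subst h2; rfl
  by_cases h3 : s = "MEDIUM"
  · subst h3; rfl
  by_cases h4 : s = "LOW"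
  · subst h4; rfl
  by_cases h5 : s = "INFO"
  · subst h5; rfl
  have hitems : sevMap.items =
      [("CRITICAL", (4 : Int)), ("HIGH", 3), ("MEDIUM", 2), ("LOW", 1), ("INFO", 0)] := rfl
  have hb1 : ("CRITICAL" == s) = false := beq_eq_false_iff_ne.mpr (Ne.symm h1)
  have hb2 : ("HIGH" == s) = false := beq_eq_false_iff_ne.mpr (Ne.symm h2)
  have hb3 : ("MEDIUM" == s) = false := beq_eq_false_iff_ne.mpr (Ne.symm h3)
  have hb4 : ("LOW" == s) = false := beq_eq_false_iff_ne.mpr (Ne.symm h4)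
  have hb5 : ("INFO" == s) = false := beq_eq_false_iff_ne.mpr (Ne.symm h5)
  simp [PySem.Dict.getD, PySem.Dict.get?, hitems, List.find?, h1, h2, h3, h4, h5,
    hb1, hb2, hb3, hb4, hb5]

-- the "best" entry A keeps for a key k
def bestFor (fs : List (List (String × String))) (k : String) : List (String × String) :=
  (PySem.List.max? (fs.filter (fun f => flowKey f == k)) flowRank).getD []

def bStep (m y : List (String × String)) : List (String × String) :=
  if flowRank m < flowRank y then y else m

lemma max?_snoc {α κ : Type} [LT κ] [DecidableLT κ] (g : List α) (f : α) (key : α → κ) :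
    PySem.List.max? (g ++ [f]) key =
      match PySem.List.max? g key with
      | none => some f
      | some m => if key m < key f then some f else some m := by
  simp [PySem.List.max?, List.foldl_append]; rfl

lemma find?_beq_self (ks : List String) (k : String) :
    ks.find? (fun x => x == k) = if k ∈ ks then some k else none := by
  induction ks with
  | nil => simp
  | cons h t ih =>
    by_cases hk : h = k
    · subst hk; simp
    · simp [hk, ih, Ne.symm hk]

lemma get?_of_items {ν : Type} (d : PySem.Dict String ν) (ks : List String) (v : String → ν)
    (h : d.items = ks.map (fun k => (k, v k))) (k : String) :
    d.get? k = if k ∈ ks then some (v k) else none := by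
  simp [PySem.Dict.get?, h, List.find?_map, Function.comp_def, find?_beq_self]

lemma contains_of_items {ν : Type} (d : PySem.Dict String ν) (ks : List String) (v : String → ν)
    (h : d.items = ks.map (fun k => (k, v k))) (k : String) :
    d.contains k = decide (k ∈ ks) := by
  simp [PySem.Dict.contains, h, List.any_map, Function.comp_def]
  simp [List.any_beq']

lemma dedup_snoc {α : Type} [BEq α] [LawfulBEq α] (l : List α) (x : α) :
    PySem.List.dedup (l ++ [x]) = if x ∈ l then PySem.List.dedup l else PySem.List.dedup l ++ [x] := by
  have : PySem.List.dedup (l ++ [x]) = PySem.Set.add (PySem.List.dedup l) x := by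
    simp [PySem.List.dedup, PySem.Set.ofList, List.foldl_append]
  rw [this]
  by_cases hx : x ∈ l
  · rw [if_pos hx]
    simp [PySem.Set.add]
    exact hx
  · rw [if_neg hx]
    simp [PySem.Set.add]
    exact hx

lemma bestFor_snoc_ne (fs : List (List (String × String))) (f : List (String × String)) (k : String)
    (h : flowKey f ≠ k) : bestFor (fs ++ [f]) k = bestFor fs k := by
  simp [bestFor, List.filter_append, h]

lemma bestFor_snoc_self (fs : List (List (String × String))) (f : List (String × String)) :
    bestFor (fs ++ [f]) (flowKey f) =
      match PySem.List.max? (fs.filter (fun g => flowKey g == flowKey f)) flowRank with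
      | none => f
      | some m => if flowRank m < flowRank f then f else m := by
  simp only [bestFor, List.filter_append, List.filter_cons, List.filter_nil, beq_self_eq_true,
    if_pos, max?_snoc]
  cases hm : PySem.List.max? (fs.filter (fun g => flowKey g == flowKey f)) flowRank with
  | none => simp
  | some m => simp only; split <;> simp

lemma max?_mem_ne_none (fs : List (List (String × String))) (k : String) (h : k ∈ fs.map flowKey) :
    PySem.List.max? (fs.filter (fun f => flowKey f == k)) flowRank ≠ none := by
  intro hnone
  rw [PySem.List.max?_eq_none_iff] at hnone
  obtain ⟨f, hf, rfl⟩ := List.mem_map.mp h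
  have : f ∈ fs.filter (fun g => flowKey g == flowKey f) := by simp [List.mem_filter, hf]
  simp [hnone] at this

lemma items_foldl_stepA (fs : List (List (String × String))) :
    (fs.foldl stepA PySem.Dict.empty).items =
      (PySem.List.dedup (fs.map flowKey)).map (fun k => (k, bestFor fs k)) := by
  induction fs using List.reverseRecOn with
  | nil => rfl
  | append_singleton fs f ih =>
    rw [List.foldl_append, List.map_append, List.map_cons, List.map_nil, dedup_snoc]
    by_cases hmem : flowKey f ∈ fs.map flowKey
    · have hget := get?_of_items _ _ _ ih (flowKey f)
      have hcont := contains_of_items _ _ _ ih (flowKey f)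
      have hmem' : flowKey f ∈ PySem.List.dedup (fs.map flowKey) := by
        simpa [PySem.List.mem_dedup] using hmem
      obtain ⟨m, hm⟩ : ∃ m, PySem.List.max? (fs.filter (fun g => flowKey g == flowKey f)) flowRank = some m :=
        Option.ne_none_iff_exists'.mp (max?_mem_ne_none fs _ hmem)
      have hbest : bestFor fs (flowKey f) = m := by simp [bestFor, hm]
      rw [if_pos hmem]
      simp only [List.foldl_cons, List.foldl_nil, stepA, hget, if_pos hmem', hbest]
      by_cases hlt : flowRank m < flowRank f
      · rw [if_pos hlt, PySem.Dict.items_insert_of_contains _ _ (by rw [hcont]; simpa using hmem'),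
          ih, List.map_map]
        apply List.map_congr_left
        intro k hk
        by_cases hkf : k = flowKey f
        · subst hkf
          simp [bestFor_snoc_self, hm, hlt]
        · simp [hkf, bestFor_snoc_ne fs f k (fun h => hkf h.symm)]
      · rw [if_neg hlt, ih]
        apply List.map_congr_left
        intro k hk
        by_cases hkf : k = flowKey f
        · subst hkf
          simp [bestFor_snoc_self, hm, hlt, hbest]
        · rw [bestFor_snoc_ne fs f k (fun h => hkf h.symm)]
    · have hget := get?_of_items _ _ _ ih (flowKey f)
      have hcont := contains_of_items _ _ _ ih (flowKey f)
      have hmem' : flowKey f ∉ PySem.List.dedup (fs.map flowKey) := by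
        simpa [PySem.List.mem_dedup] using hmem
      rw [if_neg hmem]
      simp only [List.foldl_cons, List.foldl_nil, stepA, hget, if_neg hmem']
      rw [PySem.Dict.items_insert_of_not_contains _ _ (by rw [hcont]; simpa using hmem'), ih,
        List.map_append]
      congr 1
      · apply List.map_congr_left
        intro k hk
        have hkf : flowKey f ≠ k := by
          intro h; exact hmem' (h ▸ hk)
        rw [bestFor_snoc_ne fs f k hkf]
      · simp only [List.map_cons, List.map_nil]
        have hnil : fs.filter (fun g => flowKey g == flowKey f) = [] := by
          rw [List.filter_eq_nil_iff]
          intro g hg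
          simp only [beq_iff_eq]
          intro h
          exact hmem (h ▸ List.mem_map_of_mem hg)
        rw [bestFor_snoc_self]
        simp [hnil, PySem.List.max?]

-- So A's result is (dedup keys).map (bestFor flows).  Now characterise B the same way.

lemma foldl_addSet_of_mem {α : Type} [BEq α] [LawfulBEq α] (l : List α) (acc : List α) (k : α)
    (h : k ∈ acc) :
    l.foldl PySem.Set.add acc = (l.filter (fun x => !(x == k))).foldl PySem.Set.add acc := by
  induction l generalizing acc with
  | nil => rfl
  | cons x t ih =>
    by_cases hx : x = k
    · subst hx
      simp only [List.foldl_cons, List.filter_cons, beq_self_eq_true, Bool.not_true]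
      rw [show PySem.Set.add acc x = acc by simp [PySem.Set.add, h]]
      exact ih acc h
    · have hfc : (fun x => !(x == k)) x = true := by simp [hx]
      rw [List.foldl_cons, List.filter_cons, if_pos hfc, List.foldl_cons]
      exact ih _ (by by_cases hm : x ∈ acc <;> simp [PySem.Set.add, hm, h])

lemma foldl_addSet_cons {α : Type} [BEq α] [LawfulBEq α] (l : List α) (s : List α) (k : α)
    (h : ∀ x ∈ l, x ≠ k) : l.foldl PySem.Set.add (k :: s) = k :: l.foldl PySem.Set.add s := by
  induction l generalizing s with
  | nil => rfl
  | cons x t ih =>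
    have hx : x ≠ k := h x List.mem_cons_self
    have : PySem.Set.add (k :: s) x = k :: PySem.Set.add s x := by
      by_cases hm : x ∈ s <;> simp [PySem.Set.add, hm, hx]
    rw [List.foldl_cons, this, List.foldl_cons, ih _ (fun y hy => h y (List.mem_cons_of_mem _ hy))]

lemma dedup_cons {α : Type} [BEq α] [LawfulBEq α] (k : α) (l : List α) :
    PySem.List.dedup (k :: l) = k :: PySem.List.dedup (l.filter (fun x => !(x == k))) := by
  show (k :: l).foldl PySem.Set.add [] =
    k :: (l.filter (fun x => !(x == k))).foldl PySem.Set.add []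
  rw [List.foldl_cons, show PySem.Set.add ([] : List α) k = [k] from rfl,
    foldl_addSet_of_mem l [k] k (by simp),
    foldl_addSet_cons _ _ _ (fun x hx => by simpa using (List.mem_filter.mp hx).2)]

lemma max?_cons {α κ : Type} [LT κ] [DecidableLT κ] (x : α) (l : List α) (key : α → κ) :
    PySem.List.max? (x :: l) key =
      some (l.foldl (fun m y => if key m < key y then y else m) x) := by
  induction l using List.reverseRecOn with
  | nil => simp [PySem.List.max?]
  | append_singleton t y ih =>
    rw [show x :: (t ++ [y]) = (x :: t) ++ [y] from rfl, max?_snoc, ih, List.foldl_append]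
    simp only [List.foldl_cons, List.foldl_nil]
    exact (apply_ite some _ _ _).symm

-- B's guarded inner fold is the unguarded fold over the key-filtered suffix
lemma foldl_guard (l : List (List (String × String))) (k : String) (b : List (String × String)) :
    l.foldl (fun best g => if flowKey g = k ∧ flowRank best < flowRank g then g else best) b =
      (l.filter (fun g => flowKey g == k)).foldl
        (fun m y => if flowRank m < flowRank y then y else m) b := by
  induction l generalizing b with
  | nil => rfl
  | cons g t ih =>
    by_cases hg : flowKey g = k
    · simp only [List.foldl_cons, List.filter_cons, hg, beq_self_eq_true, if_pos]
      rw [ih]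
      congr 1
      simp [hg]
    · simp only [List.foldl_cons, List.filter_cons, hg, beq_iff_eq, decide_false, false_and,
        if_false]
      simpa [hg] using ih b

lemma bLoop_eq (rest : List (List (String × String))) (seen : List String) :
    bLoop seen rest =
      (PySem.List.dedup ((rest.map flowKey).filter (fun k => !(seen.contains k)))).map
        (bestFor rest) := by
  induction rest generalizing seen with
  | nil => rfl
  | cons f rest2 ih =>
    simp only [bLoop, keyB_eq, rankB_eq, List.map_cons, List.filter_cons]
    by_cases hs : flowKey f ∈ seen
    · rw [if_pos (List.contains_iff_mem.mpr hs), ih]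
      rw [if_neg (by simp [hs])]
      apply List.map_congr_left
      intro k hk
      have hk' : k ∉ seen := by
        have := (List.mem_filter.mp ((PySem.List.mem_dedup _ _).mp hk)).2
        simpa [List.contains_iff_mem] using this
      have hne : flowKey f ≠ k := fun h => hk' (h ▸ hs)
      simp [bestFor, hne]
    · rw [if_neg (by simpa [List.contains_iff_mem] using hs), ih]
      rw [if_pos (by simp [hs])]
      rw [dedup_cons, List.map_cons]
      congr 1
      · -- head: the guarded fold over the suffix is bestFor (f :: rest2) (flowKey f)
        rw [foldl_guard]
        simp [bestFor, max?_cons]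
      · have hfilter :
            ((rest2.map flowKey).filter (fun x => !(seen ++ [flowKey f]).contains x)) =
              (((rest2.map flowKey).filter (fun x => !(seen.contains x))).filter
                (fun x => !(x == flowKey f))) := by
          rw [List.filter_filter]
          apply List.filter_congr
          intro x _
          by_cases h1 : x ∈ seen <;> by_cases h2 : x = flowKey f <;>
            simp [h1, h2]
        rw [hfilter]
        apply List.map_congr_left
        intro k hk
        have hne : flowKey f ≠ k := by
          have := (List.mem_filter.mp ((PySem.List.mem_dedup _ _).mp hk)).2
          simp at this
          exact fun h => this h.symm
        simp [bestFor, hne]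

-- ===== VERDICT (by name: the statement is the Claim_ definition above) =====
theorem remove_duplicate_flows_spec : Claim_equal_remove_duplicate_flows := by
  intro flows _
  unfold Spec_remove_duplicate_flows
  by_cases h : flows = []
  · subst h; rfl
  · simp only [remove_duplicate_flows, remove_duplicate_flows_alt, if_neg h, PySem.Dict.values,
      items_foldl_stepA, List.map_map, bLoop_eq]
    simp [bestFor]
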